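-- pv_equiv track=rewrite | github.com/Eiasash/InternalMedicine | scripts/check-innerhtml-pieces.py | find_statement_end
-- ===== SOURCE A (Python) =====
-- def skip_string(text, i):
--     n = len(text)
--     if i >= n:
--         return -1
--     c = text[i]
--     if c in ('"', "'"):
--         quote = c
--         i += 1
--         while i < n:
--             if text[i] == '\\':
--                 i += 2
--                 continue
--             if text[i] == quote:
--                 return i + 1
--             if text[i] == '\n':
--                 return i
--             i += 1
--         return n
--     if c == '`':
--         return -2
--     return -1
--
-- def skip_backtick(text, i):
--     n = len(text)
--     i += 1
--     depth = 0
--     while i < n: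
--         if text[i] == '\\':
--             i += 2
--             continue
--         if text[i:i + 2] == '${':
--             depth += 1
--             i += 2
--             continue
--         if depth > 0 and text[i] == '}':
--             depth -= 1
--             i += 1
--             continue
--         if depth == 0 and text[i] == '`':
--             return i + 1
--         i += 1
--     return n
--
-- def find_statement_end(text, start):
--     i = start
--     n = len(text)
--     while i < n:
--         c = text[i]
--         c2 = text[i:i + 2]
--         if c2 == '//':
--             nl = text.find('\n', i)
--             if nl == -1:
--                 return n
--             i = nl + 1
--             continue
--         if c2 == '/*':
--             end = text.find('*/', i + 2)
--             if end == -1: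
--                 return n
--             i = end + 2
--             continue
--         if c in ('"', "'"):
--             skipped = skip_string(text, i)
--             i = skipped if skipped > 0 else n
--             continue
--         if c == '`':
--             i = skip_backtick(text, i)
--             continue
--         if c == ';':
--             return i
--         i += 1
--     return n
-- ===== SOURCE B (Python) =====
-- def find_statement_end(text, start):
--     n = len(text)
--     i = start if start > 0 else 0
--     state = 'N'
--     quote = ''
--     depth = 0
--     while i < n:
--         c = text[i]
--         nxt = text[i + 1] if i + 1 < n else ''
--         if state == 'N':
--             if c == '/' and nxt == '/':
--                 state = 'L'; i += 2
--             elif c == '/' and nxt == '*':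
--                 state = 'B'; i += 2
--             elif c == '"' or c == "'":
--                 state = 'S'; quote = c; i += 1
--             elif c == '`':
--                 state = 'T'; depth = 0; i += 1
--             elif c == ';':
--                 return i
--             else:
--                 i += 1
--         elif state == 'L':
--             if c == '\n':
--                 state = 'N'
--             i += 1
--         elif state == 'B':
--             if c == '*' and nxt == '/':
--                 state = 'N'; i += 2
--             else:
--                 i += 1
--         elif state == 'S':
--             if c == '\\':
--                 i += 2
--             else:
--                 if c == quote or c == '\n':
--                     state = 'N'
--                 i += 1
--         else:  # 'T'
--             if c == '\\':
--                 i += 2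
--             elif c == '$' and nxt == '{':
--                 depth += 1; i += 2
--             elif depth > 0 and c == '}':
--                 depth -= 1; i += 1
--             elif depth == 0 and c == '`':
--                 state = 'N'; i += 1
--             else:
--                 i += 1
--     return n
-- ===== Notes on version B (the rewrite author's own statement) =====
-- stated objective: alternative
-- what changed: Replaced A's nested helper loops and str.find jumps (skip_string, skip_backtick, find-based comment skipping) by a single flat character-at-a-time loop carrying an explicit lexer state (NORMAL / LINE-COMMENT / BLOCK-COMMENT / IN-STRING(quote) / IN-TEMPLATE(brace depth)).
-- outside the precondition, e.g. on find_statement_end('a;b', -3): A returns -2, B returns 1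
import Mathlib
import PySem

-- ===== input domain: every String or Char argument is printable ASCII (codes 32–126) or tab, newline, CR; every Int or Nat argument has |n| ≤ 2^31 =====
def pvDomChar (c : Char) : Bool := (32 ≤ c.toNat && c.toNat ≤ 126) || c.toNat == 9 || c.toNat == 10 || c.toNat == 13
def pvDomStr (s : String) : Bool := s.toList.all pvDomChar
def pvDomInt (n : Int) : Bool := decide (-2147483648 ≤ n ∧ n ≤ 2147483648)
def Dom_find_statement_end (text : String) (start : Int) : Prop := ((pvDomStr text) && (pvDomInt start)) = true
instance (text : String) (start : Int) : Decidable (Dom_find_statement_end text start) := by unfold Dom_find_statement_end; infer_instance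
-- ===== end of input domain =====

-- B replaces A's helper-function / str.find decomposition by one flat loop with an explicit lexer state
-- (objective: alternative decomposition, same cost). Equality is claimed for 0 ≤ start (Pre_).
-- All loops recurse on a fuel argument bounding the iteration count (the index strictly increases each
-- pass, so length+1 iterations always suffice from a nonnegative index); this is only a totality guard.

-- ===== PORT A =====

-- hand port of Python str.find(ch, start) for a one-char needle (exact: clamps a negative start like Python, -1 if absent)
def pvFindCharGo (cs : List Char) (ch : Char) : Nat → Nat → Int
  | 0, _ => -1
  | fuel+1, j =>
    if j < cs.length then
      (if cs.getD j ' ' = ch then (j : Int) else pvFindCharGo cs ch fuel (j + 1))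
    else -1

def pvFindChar (cs : List Char) (ch : Char) (j : Int) : Int :=
  let s : Int := if j < 0 then max (j + cs.length) 0 else j
  pvFindCharGo cs ch (cs.length + 1) s.toNat

-- hand port of Python str.find(a+b, start) for a two-char needle (exact: first index j with cs[j]=a, cs[j+1]=b)
def pvFindSub2Go (cs : List Char) (a b : Char) : Nat → Nat → Int
  | 0, _ => -1
  | fuel+1, j =>
    if j + 1 < cs.length then
      (if cs.getD j ' ' = a ∧ cs.getD (j+1) ' ' = b then (j : Int) else pvFindSub2Go cs a b fuel (j + 1))
    else -1

def pvFindSub2 (cs : List Char) (a b : Char) (j : Int) : Int :=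
  let s : Int := if j < 0 then max (j + cs.length) 0 else j
  pvFindSub2Go cs a b (cs.length + 1) s.toNat

-- the while-loop inside skip_string, after the quote character was read
def aSkipStrGo (cs : List Char) (q : Char) : Nat → Int → Int
  | 0, _ => cs.length
  | fuel+1, j =>
    if j < (cs.length : Int) then
      match PySem.List.pyGet? cs j with
      | none => 0   -- IndexError (unreachable for 0 ≤ j)
      | some c =>
        if c = '\\' then aSkipStrGo cs q fuel (j + 2)
        else if c = q then j + 1
        else if c = '\n' then j
        else aSkipStrGo cs q fuel (j + 1)
    else (cs.length : Int)

def aSkipString (cs : List Char) (i : Int) : Int :=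
  if (cs.length : Int) ≤ i then -1
  else
    match PySem.List.pyGet? cs i with
    | none => 0   -- IndexError (unreachable for 0 ≤ i)
    | some c =>
      if c = '"' ∨ c = '\'' then aSkipStrGo cs c (cs.length + 1) (i + 1)
      else if c = '`' then -2
      else -1

-- the while-loop inside skip_backtick
def aSkipBtGo (cs : List Char) : Nat → Int → Int → Int
  | 0, _, _ => cs.length
  | fuel+1, d, j =>
    if j < (cs.length : Int) then
      match PySem.List.pyGet? cs j with
      | none => 0   -- IndexError (unreachable for 0 ≤ j)
      | some c =>
        if c = '\\' then aSkipBtGo cs fuel d (j + 2)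
        else if PySem.List.slice cs (some j) (some (j + 2)) = ['$', '{'] then aSkipBtGo cs fuel (d + 1) (j + 2)
        else if d > 0 ∧ c = '}' then aSkipBtGo cs fuel (d - 1) (j + 1)
        else if d = 0 ∧ c = '`' then j + 1
        else aSkipBtGo cs fuel d (j + 1)
    else (cs.length : Int)

def aSkipBacktick (cs : List Char) (i : Int) : Int :=
  aSkipBtGo cs (cs.length + 1) 0 (i + 1)

def aMain (cs : List Char) : Nat → Int → Int
  | 0, _ => cs.length
  | fuel+1, i =>
    if i < (cs.length : Int) then
      match PySem.List.pyGet? cs i with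
      | none => 0   -- IndexError (unreachable for 0 ≤ i)
      | some c =>
        let c2 := PySem.List.slice cs (some i) (some (i + 2))
        if c2 = ['/', '/'] then
          let nl := pvFindChar cs '\n' i
          if nl = -1 then (cs.length : Int) else aMain cs fuel (nl + 1)
        else if c2 = ['/', '*'] then
          let e := pvFindSub2 cs '*' '/' (i + 2)
          if e = -1 then (cs.length : Int) else aMain cs fuel (e + 2)
        else if c = '"' ∨ c = '\'' then
          let s := aSkipString cs i
          aMain cs fuel (if s > 0 then s else (cs.length : Int))
        else if c = '`' then aMain cs fuel (aSkipBacktick cs i)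
        else if c = ';' then i
        else aMain cs fuel (i + 1)
    else (cs.length : Int)

def find_statement_end (text : String) (start : Int) : Int :=
  aMain text.toList (text.toList.length + start.natAbs + 1) start

-- ===== PORT B =====

inductive PvState where
  | normal : PvState
  | line : PvState
  | block : PvState
  | str : Char → PvState
  | tmpl : Int → PvState
deriving DecidableEq, Repr

def bLoop (cs : List Char) : Nat → PvState → Int → Int
  | 0, _, _ => cs.length
  | fuel+1, st, i =>
    if i < (cs.length : Int) then
      match PySem.List.pyGet? cs i with
      | none => 0   -- unreachable: the loop only visits 0 ≤ i
      | some c =>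
        let nxt := PySem.List.pyGet? cs (i + 1)   -- text[i+1] if i+1 < n else ''
        match st with
        | .normal =>
          if c = '/' ∧ nxt = some '/' then bLoop cs fuel .line (i + 2)
          else if c = '/' ∧ nxt = some '*' then bLoop cs fuel .block (i + 2)
          else if c = '"' ∨ c = '\'' then bLoop cs fuel (.str c) (i + 1)
          else if c = '`' then bLoop cs fuel (.tmpl 0) (i + 1)
          else if c = ';' then i
          else bLoop cs fuel .normal (i + 1)
        | .line => if c = '\n' then bLoop cs fuel .normal (i + 1) else bLoop cs fuel .line (i + 1)
        | .block =>
          if c = '*' ∧ nxt = some '/' then bLoop cs fuel .normal (i + 2) else bLoop cs fuel .block (i + 1)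
        | .str q =>
          if c = '\\' then bLoop cs fuel (.str q) (i + 2)
          else if c = q then bLoop cs fuel .normal (i + 1)
          else if c = '\n' then bLoop cs fuel .normal (i + 1)
          else bLoop cs fuel (.str q) (i + 1)
        | .tmpl d =>
          if c = '\\' then bLoop cs fuel (.tmpl d) (i + 2)
          else if c = '$' ∧ nxt = some '{' then bLoop cs fuel (.tmpl (d + 1)) (i + 2)
          else if d > 0 ∧ c = '}' then bLoop cs fuel (.tmpl (d - 1)) (i + 1)
          else if d = 0 ∧ c = '`' then bLoop cs fuel .normal (i + 1)
          else bLoop cs fuel (.tmpl d) (i + 1)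
    else (cs.length : Int)

def find_statement_end_alt (text : String) (start : Int) : Int :=
  bLoop text.toList (text.toList.length + 1) .normal (if start > 0 then start else 0)

-- ===== PRECONDITION & SPEC =====
-- Pre_ keeps the natural domain 0 ≤ start: a negative start makes Python index from the end of the
-- string (wraparound) or raise IndexError, an accident of A's implementation; B scans from 0 there.
def Pre_find_statement_end (text : String) (start : Int) : Prop := 0 ≤ start
instance (text : String) (start : Int) : Decidable (Pre_find_statement_end text start) := by unfold Pre_find_statement_end; infer_instance

def pvWitness_find_statement_end : String × Int := ("a;b", 0)

def Spec_find_statement_end (text : String) (start : Int) (out : Int) : Prop := out = find_statement_end_alt text start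
instance (text : String) (start : Int) (out : Int) : Decidable (Spec_find_statement_end text start out) := by unfold Spec_find_statement_end; infer_instance

-- ===== CLAIM (what is proved, stated in full; the proofs are below) =====
def Claim_equal_find_statement_end : Prop := ∀ (text : String) (start : Int), Dom_find_statement_end text start → Pre_find_statement_end text start → Spec_find_statement_end text start (find_statement_end text start)

-- ===== LEMMAS AND PROOFS =====

theorem slice_pair (cs : List Char) (m : Nat) (h : m < cs.length) (a b : Char) :
    (PySem.List.slice cs (some (m:Int)) (some ((m:Int)+2)) = [a,b]) ↔ (cs[m] = a ∧ cs[m+1]? = some b) := by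
  have hc : ((m:Int)+2) = (((m+2:Nat)):Int) := by push_cast; ring
  rw [hc, PySem.List.slice_natCast]
  have h2 : m + 2 - m = 2 := by omega
  rw [h2, List.drop_eq_getElem_cons h, List.take_succ_cons, List.take_one, List.head?_drop]
  cases hx : cs[m+1]? <;> simp [hx]

theorem pyGet?_at (cs : List Char) (m : Nat) (h : m < cs.length) :
    PySem.List.pyGet? cs (m:Int) = some cs[m] := by
  simp [List.getElem?_eq_getElem h]

theorem getD_at (cs : List Char) (m : Nat) (h : m < cs.length) :
    cs.getD m ' ' = cs[m] := by
  simp [List.getD_eq_getElem?_getD, List.getElem?_eq_getElem h]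

theorem bLoop_ge (cs : List Char) (F : Nat) (st : PvState) (i : Int) (h : (cs.length : Int) ≤ i) :
    bLoop cs F st i = cs.length := by
  cases F with
  | zero => rfl
  | succ F => rw [bLoop, if_neg (by omega)]

theorem aMain_ge (cs : List Char) (F : Nat) (i : Int) (h : (cs.length : Int) ≤ i) :
    aMain cs F i = cs.length := by
  cases F with
  | zero => rfl
  | succ F => rw [aMain, if_neg (by omega)]

-- lower/upper bounds on the loop results (loops only move forward)

theorem pvFindCharGo_ge (cs : List Char) (ch : Char) : ∀ (F : Nat) (j : Nat),
    pvFindCharGo cs ch F j = -1 ∨ ((j:Int) ≤ pvFindCharGo cs ch F j ∧ pvFindCharGo cs ch F j < cs.length) := by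
  intro F
  induction F with
  | zero => intro j; left; rfl
  | succ F ih =>
      intro j
      rw [pvFindCharGo]
      by_cases h : j < cs.length
      · rw [if_pos h]
        by_cases hc : cs.getD j ' ' = ch
        · rw [if_pos hc]; right; omega
        · rw [if_neg hc]
          rcases ih (j+1) with h1 | h1
          · left; exact h1
          · right; omega
      · rw [if_neg h]; left; rfl

theorem pvFindSub2Go_ge (cs : List Char) (a b : Char) : ∀ (F : Nat) (j : Nat),
    pvFindSub2Go cs a b F j = -1 ∨ ((j:Int) ≤ pvFindSub2Go cs a b F j ∧ pvFindSub2Go cs a b F j < cs.length) := by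
  intro F
  induction F with
  | zero => intro j; left; rfl
  | succ F ih =>
      intro j
      rw [pvFindSub2Go]
      by_cases h : j + 1 < cs.length
      · rw [if_pos h]
        by_cases hc : cs.getD j ' ' = a ∧ cs.getD (j+1) ' ' = b
        · rw [if_pos hc]; right; omega
        · rw [if_neg hc]
          rcases ih (j+1) with h1 | h1
          · left; exact h1
          · right; omega
      · rw [if_neg h]; left; rfl

theorem aSkipStrGo_ge (cs : List Char) (q : Char) : ∀ (F : Nat) (j : Int),
    j ≤ aSkipStrGo cs q F j ∨ aSkipStrGo cs q F j = cs.length := by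
  intro F
  induction F with
  | zero => intro j; right; rfl
  | succ F ih =>
      intro j
      rw [aSkipStrGo]
      by_cases h : j < (cs.length : Int)
      · rw [if_pos h]
        match hg : PySem.List.pyGet? cs j with
        | none =>
            have hn := (PySem.List.pyGet?_eq_none_iff cs j).mp hg
            simp only [PySem.Raise.InRange, not_and, not_lt] at hn
            left; show j ≤ (0:Int); omega
        | some c =>
            simp only
            by_cases h1 : c = '\\'
            · rw [if_pos h1]
              rcases ih (j+2) with hh | hh
              · left; omega
              · right; exact hh
            · rw [if_neg h1]
              by_cases h2 : c = q
              · rw [if_pos h2]; left; omega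
              · rw [if_neg h2]
                by_cases h3 : c = '\n'
                · rw [if_pos h3]; left; omega
                · rw [if_neg h3]
                  rcases ih (j+1) with hh | hh
                  · left; omega
                  · right; exact hh
      · rw [if_neg h]; right; rfl

theorem aSkipBtGo_ge (cs : List Char) : ∀ (F : Nat) (d : Int) (j : Int),
    j + 1 ≤ aSkipBtGo cs F d j ∨ aSkipBtGo cs F d j = cs.length := by
  intro F
  induction F with
  | zero => intro d j; right; rfl
  | succ F ih =>
      intro d j
      rw [aSkipBtGo]
      by_cases h : j < (cs.length : Int)
      · rw [if_pos h]
        match hg : PySem.List.pyGet? cs j with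
        | none =>
            have hn := (PySem.List.pyGet?_eq_none_iff cs j).mp hg
            simp only [PySem.Raise.InRange, not_and, not_lt] at hn
            left; show j + 1 ≤ (0:Int); omega
        | some c =>
            simp only
            by_cases h1 : c = '\\'
            · rw [if_pos h1]
              rcases ih (d) (j+2) with hh | hh
              · left; omega
              · right; exact hh
            · rw [if_neg h1]
              by_cases h2 : PySem.List.slice cs (some j) (some (j + 2)) = ['$', '{']
              · rw [if_pos h2]
                rcases ih (d+1) (j+2) with hh | hh
                · left; omega
                · right; exact hh
              · rw [if_neg h2]
                by_cases h3 : d > 0 ∧ c = '}'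
                · rw [if_pos h3]
                  rcases ih (d-1) (j+1) with hh | hh
                  · left; omega
                  · right; exact hh
                · rw [if_neg h3]
                  by_cases h4 : d = 0 ∧ c = '`'
                  · rw [if_pos h4]; left; omega
                  · rw [if_neg h4]
                    rcases ih d (j+1) with hh | hh
                    · left; omega
                    · right; exact hh
      · rw [if_neg h]; right; rfl

-- the fuel arguments are only totality guards: any sufficient fuel gives the same value

theorem pvFindCharGo_irrel (cs : List Char) (ch : Char) : ∀ (F F' : Nat) (j : Nat),
    cs.length - j < F → cs.length - j < F' →
    pvFindCharGo cs ch F j = pvFindCharGo cs ch F' j := by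
  intro F
  induction F with
  | zero => intro F' j hF hF'; omega
  | succ F ih =>
      intro F' j hF hF'
      cases F' with
      | zero => omega
      | succ F' =>
          rw [pvFindCharGo, pvFindCharGo]
          by_cases h : j < cs.length
          · rw [if_pos h, if_pos h]
            by_cases hc : cs.getD j ' ' = ch
            · rw [if_pos hc, if_pos hc]
            · rw [if_neg hc, if_neg hc]
              exact ih F' (j+1) (by omega) (by omega)
          · rw [if_neg h, if_neg h]

theorem bLoop_irrel (cs : List Char) : ∀ (F F' : Nat) (st : PvState) (m : Nat),
    cs.length - m < F → cs.length - m < F' →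
    bLoop cs F st (m:Int) = bLoop cs F' st (m:Int) := by
  intro F
  induction F with
  | zero => intro F' st m hF hF'; omega
  | succ F ih =>
      intro F' st m hF hF'
      cases F' with
      | zero => omega
      | succ F' =>
          by_cases h : m < cs.length
          · have hlt : (m:Int) < (cs.length : Int) := by exact_mod_cast h
            have hcast2 : (m:Int) + 2 = ((m+2 : Nat) : Int) := by push_cast; ring
            have hcast1 : (m:Int) + 1 = ((m+1 : Nat) : Int) := by push_cast; ring
            have ih1 : ∀ st, bLoop cs F st ((m+1:Nat):Int) = bLoop cs F' st ((m+1:Nat):Int) :=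
              fun st => ih F' st (m+1) (by omega) (by omega)
            have ih2 : ∀ st, bLoop cs F st ((m+2:Nat):Int) = bLoop cs F' st ((m+2:Nat):Int) :=
              fun st => ih F' st (m+2) (by omega) (by omega)
            cases st with
            | normal =>
                rw [bLoop, bLoop, if_pos hlt, if_pos hlt]
                simp only [pyGet?_at cs m h]
                by_cases h1 : cs[m] = '/' ∧ PySem.List.pyGet? cs ((m:Int)+1) = some '/'
                · rw [if_pos h1, if_pos h1, hcast2, ih2]
                · rw [if_neg h1, if_neg h1]
                  by_cases h2 : cs[m] = '/' ∧ PySem.List.pyGet? cs ((m:Int)+1) = some '*'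
                  · rw [if_pos h2, if_pos h2, hcast2, ih2]
                  · rw [if_neg h2, if_neg h2]
                    by_cases h3 : cs[m] = '"' ∨ cs[m] = '\''
                    · rw [if_pos h3, if_pos h3, hcast1, ih1]
                    · rw [if_neg h3, if_neg h3]
                      by_cases h4 : cs[m] = '`'
                      · rw [if_pos h4, if_pos h4, hcast1, ih1]
                      · rw [if_neg h4, if_neg h4]
                        by_cases h5 : cs[m] = ';'
                        · rw [if_pos h5, if_pos h5]
                        · rw [if_neg h5, if_neg h5, hcast1, ih1]
            | line =>
                rw [bLoop, bLoop, if_pos hlt, if_pos hlt]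
                simp only [pyGet?_at cs m h]
                by_cases h1 : cs[m] = '\n'
                · rw [if_pos h1, if_pos h1, hcast1, ih1]
                · rw [if_neg h1, if_neg h1, hcast1, ih1]
            | block =>
                rw [bLoop, bLoop, if_pos hlt, if_pos hlt]
                simp only [pyGet?_at cs m h]
                by_cases h1 : cs[m] = '*' ∧ PySem.List.pyGet? cs ((m:Int)+1) = some '/'
                · rw [if_pos h1, if_pos h1, hcast2, ih2]
                · rw [if_neg h1, if_neg h1, hcast1, ih1]
            | str q =>
                rw [bLoop, bLoop, if_pos hlt, if_pos hlt]
                simp only [pyGet?_at cs m h]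
                by_cases h1 : cs[m] = '\\'
                · rw [if_pos h1, if_pos h1, hcast2, ih2]
                · rw [if_neg h1, if_neg h1]
                  by_cases h2 : cs[m] = q
                  · rw [if_pos h2, if_pos h2, hcast1, ih1]
                  · rw [if_neg h2, if_neg h2]
                    by_cases h3 : cs[m] = '\n'
                    · rw [if_pos h3, if_pos h3, hcast1, ih1]
                    · rw [if_neg h3, if_neg h3, hcast1, ih1]
            | tmpl d =>
                rw [bLoop, bLoop, if_pos hlt, if_pos hlt]
                simp only [pyGet?_at cs m h]
                by_cases h1 : cs[m] = '\\'
                · rw [if_pos h1, if_pos h1, hcast2, ih2]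
                · rw [if_neg h1, if_neg h1]
                  by_cases h2 : cs[m] = '$' ∧ PySem.List.pyGet? cs ((m:Int)+1) = some '{'
                  · rw [if_pos h2, if_pos h2, hcast2, ih2]
                  · rw [if_neg h2, if_neg h2]
                    by_cases h3 : d > 0 ∧ cs[m] = '}'
                    · rw [if_pos h3, if_pos h3, hcast1, ih1]
                    · rw [if_neg h3, if_neg h3]
                      by_cases h4 : d = 0 ∧ cs[m] = '`'
                      · rw [if_pos h4, if_pos h4, hcast1, ih1]
                      · rw [if_neg h4, if_neg h4, hcast1, ih1]
          · rw [bLoop_ge cs _ _ _ (by exact_mod_cast Nat.le_of_not_lt h),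
              bLoop_ge cs _ _ _ (by exact_mod_cast Nat.le_of_not_lt h)]

theorem bLoop_normal_newline (cs : List Char) (H : Nat) (m : Nat) (hH : cs.length - m < H)
    (h : m < cs.length) (hc : cs[m] = '\n') :
    bLoop cs H .normal (m:Int) = bLoop cs H .normal ((m:Int)+1) := by
  cases H with
  | zero => omega
  | succ H =>
      rw [bLoop, if_pos (by exact_mod_cast h)]
      simp only [pyGet?_at cs m h]
      have hne : ∀ x : Char, ¬ ('\n' = x ∧ PySem.List.pyGet? cs ((m:Int)+1) = some x → False) → True := fun _ _ => trivial
      rw [if_neg (by rw [hc]; rintro ⟨hx, -⟩; exact absurd hx (by decide))]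
      rw [if_neg (by rw [hc]; rintro ⟨hx, -⟩; exact absurd hx (by decide))]
      rw [if_neg (by rw [hc]; rintro (hx | hx) <;> exact absurd hx (by decide))]
      rw [if_neg (by rw [hc]; exact (by decide : ¬ ('\n':Char) = '`'))]
      rw [if_neg (by rw [hc]; exact (by decide : ¬ ('\n':Char) = ';'))]
      have hcast1 : (m:Int) + 1 = ((m+1 : Nat) : Int) := by push_cast; ring
      rw [hcast1]
      exact bLoop_irrel cs H (H+1) .normal (m+1) (by omega) (by omega)

theorem bLoop_line_eq (cs : List Char) : ∀ (F G H : Nat) (m : Nat),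
    cs.length - m < F → cs.length - m < G → cs.length - m < H →
    bLoop cs F .line (m:Int) =
      (if pvFindCharGo cs '\n' G m = -1 then (cs.length : Int)
       else bLoop cs H .normal (pvFindCharGo cs '\n' G m + 1)) := by
  intro F
  induction F with
  | zero => intro G H m hF hG hH; omega
  | succ F ih =>
      intro G H m hF hG hH
      cases G with
      | zero => omega
      | succ G =>
          by_cases h : m < cs.length
          · rw [bLoop, if_pos (by exact_mod_cast h)]
            simp only [pyGet?_at cs m h]
            rw [pvFindCharGo, if_pos h, getD_at cs m h]
            have hcast1 : (m:Int) + 1 = ((m+1 : Nat) : Int) := by push_cast; ring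
            by_cases hc : cs[m] = '\n'
            · rw [if_pos hc, if_pos hc, if_neg (by omega : ¬ ((m:Nat):Int) = -1), hcast1]
              exact bLoop_irrel cs F H .normal (m+1) (by omega) (by omega)
            · rw [if_neg hc, if_neg hc, hcast1]
              exact ih G H (m+1) (by omega) (by omega) (by omega)
          · have hs : pvFindCharGo cs '\n' (G+1) m = -1 := by
              rw [pvFindCharGo, if_neg h]
            rw [bLoop_ge cs _ _ _ (by exact_mod_cast Nat.le_of_not_lt h), hs, if_pos rfl]

theorem bLoop_block_eq (cs : List Char) : ∀ (F G H : Nat) (m : Nat),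
    cs.length - m < F → cs.length - m < G → cs.length - m < H →
    bLoop cs F .block (m:Int) =
      (if pvFindSub2Go cs '*' '/' G m = -1 then (cs.length : Int)
       else bLoop cs H .normal (pvFindSub2Go cs '*' '/' G m + 2)) := by
  intro F
  induction F with
  | zero => intro G H m hF hG hH; omega
  | succ F ih =>
      intro G H m hF hG hH
      cases G with
      | zero => omega
      | succ G =>
          by_cases h : m < cs.length
          · rw [bLoop, if_pos (by exact_mod_cast h)]
            simp only [pyGet?_at cs m h]
            rw [pvFindSub2Go]
            have hcast1 : (m:Int) + 1 = ((m+1 : Nat) : Int) := by push_cast; ring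
            have hcast2 : (m:Int) + 2 = ((m+2 : Nat) : Int) := by push_cast; ring
            have hnxt : PySem.List.pyGet? cs ((m:Int) + 1) = cs[m+1]? := by
              rw [hcast1]; exact PySem.List.pyGet?_natCast cs (m+1)
            by_cases h1 : m + 1 < cs.length
            · rw [if_pos h1, getD_at cs m h, getD_at cs (m+1) h1]
              by_cases hc : cs[m] = '*' ∧ cs[m+1] = '/'
              · rw [if_pos hc]
                have hval : PySem.List.pyGet? cs ((m:Int) + 1) = some '/' := by
                  rw [hnxt, List.getElem?_eq_getElem h1, hc.2]
                rw [if_pos ⟨hc.1, hval⟩, if_neg (by omega : ¬ ((m:Nat):Int) = -1), hcast2]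
                exact bLoop_irrel cs F H .normal (m+2) (by omega) (by omega)
              · rw [if_neg hc]
                have hcond : ¬ (cs[m] = '*' ∧ PySem.List.pyGet? cs ((m:Int) + 1) = some '/') := by
                  rw [hnxt, List.getElem?_eq_getElem h1]
                  intro hand; exact hc ⟨hand.1, by simpa using hand.2⟩
                rw [if_neg hcond, hcast1]
                exact ih G H (m+1) (by omega) (by omega) (by omega)
            · -- m = length - 1: the two-char needle cannot match; B falls through to m+1 ≥ length
              rw [if_neg h1, if_pos rfl]
              have hnone : cs[m+1]? = none := List.getElem?_eq_none (by omega)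
              have hcond : ¬ (cs[m] = '*' ∧ PySem.List.pyGet? cs ((m:Int) + 1) = some '/') := by
                rw [hnxt, hnone]; simp
              rw [if_neg hcond, hcast1]
              exact bLoop_ge cs _ _ _ (by exact_mod_cast (by omega : cs.length ≤ m + 1))
          · have hs : pvFindSub2Go cs '*' '/' (G+1) m = -1 := by
              rw [pvFindSub2Go, if_neg (by omega : ¬ m + 1 < cs.length)]
            rw [bLoop_ge cs _ _ _ (by exact_mod_cast Nat.le_of_not_lt h), hs, if_pos rfl]

theorem bLoop_str_eq (cs : List Char) : ∀ (F G H : Nat) (m : Nat) (q : Char),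
    cs.length - m < F → cs.length - m < G → cs.length - m < H →
    bLoop cs F (.str q) (m:Int) = bLoop cs H .normal (aSkipStrGo cs q G (m:Int)) := by
  intro F
  induction F with
  | zero => intro G H m q hF hG hH; omega
  | succ F ih =>
      intro G H m q hF hG hH
      cases G with
      | zero => omega
      | succ G =>
          by_cases h : m < cs.length
          · have hlt : (m:Int) < (cs.length : Int) := by exact_mod_cast h
            rw [aSkipStrGo, if_pos hlt]
            rw [bLoop, if_pos hlt]
            simp only [pyGet?_at cs m h]
            have hcast2 : (m:Int) + 2 = ((m+2 : Nat) : Int) := by push_cast; ring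
            have hcast1 : (m:Int) + 1 = ((m+1 : Nat) : Int) := by push_cast; ring
            by_cases hb : cs[m] = '\\'
            · rw [if_pos hb, if_pos hb, hcast2, ih G H (m+2) q (by omega) (by omega) (by omega)]
            · by_cases hq : cs[m] = q
              · rw [if_neg hb, if_pos hq, if_neg hb, if_pos hq, hcast1]
                exact bLoop_irrel cs F H .normal (m+1) (by omega) (by omega)
              · by_cases hn : cs[m] = '\n'
                · rw [if_neg hb, if_neg hq, if_pos hn, if_neg hb, if_neg hq, if_pos hn, hcast1]
                  have h2 := (bLoop_normal_newline cs H m (by omega) h hn).symm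
                  rw [hcast1] at h2
                  exact (bLoop_irrel cs F H .normal (m+1) (by omega) (by omega)).trans h2
                · rw [if_neg hb, if_neg hq, if_neg hn, if_neg hb, if_neg hq, if_neg hn,
                    hcast1, ih G H (m+1) q (by omega) (by omega) (by omega)]
          · have hnlt : ¬ ((m:Int) < (cs.length : Int)) := by exact_mod_cast h
            have hs : aSkipStrGo cs q (G+1) (m:Int) = cs.length := by
              rw [aSkipStrGo, if_neg hnlt]
            rw [bLoop_ge cs _ _ _ (by omega), hs, bLoop_ge cs _ _ _ (by omega)]

theorem bLoop_tmpl_eq (cs : List Char) : ∀ (F G H : Nat) (m : Nat) (d : Int),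
    cs.length - m < F → cs.length - m < G → cs.length - m < H →
    bLoop cs F (.tmpl d) (m:Int) = bLoop cs H .normal (aSkipBtGo cs G d (m:Int)) := by
  intro F
  induction F with
  | zero => intro G H m d hF hG hH; omega
  | succ F ih =>
      intro G H m d hF hG hH
      cases G with
      | zero => omega
      | succ G =>
          by_cases h : m < cs.length
          · have hlt : (m:Int) < (cs.length : Int) := by exact_mod_cast h
            rw [aSkipBtGo, if_pos hlt]
            rw [bLoop, if_pos hlt]
            simp only [pyGet?_at cs m h]
            have hcast2 : (m:Int) + 2 = ((m+2 : Nat) : Int) := by push_cast; ring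
            have hcast1 : (m:Int) + 1 = ((m+1 : Nat) : Int) := by push_cast; ring
            have hnxt : PySem.List.pyGet? cs ((m:Int) + 1) = cs[m+1]? := by
              rw [hcast1]; exact PySem.List.pyGet?_natCast cs (m+1)
            have hsl : (PySem.List.slice cs (some (m:Int)) (some ((m:Int)+2)) = ['$','{']) ↔
                (cs[m] = '$' ∧ cs[m+1]? = some '{') := slice_pair cs m h '$' '{'
            by_cases hb : cs[m] = '\\'
            · rw [if_pos hb, if_pos hb, hcast2, ih G H (m+2) d (by omega) (by omega) (by omega)]
            · by_cases hdl : cs[m] = '$' ∧ cs[m+1]? = some '{'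
              · have hsl' : PySem.List.slice cs (some (m:Int)) (some ((m:Int)+2)) = ['$','{'] := hsl.mpr hdl
                have hx : cs[m] = '$' ∧ PySem.List.pyGet? cs ((m:Int)+1) = some '{' := ⟨hdl.1, by rw [hnxt]; exact hdl.2⟩
                rw [if_neg hb, if_pos hx, if_neg hb, if_pos hsl', hcast2,
                  ih G H (m+2) (d+1) (by omega) (by omega) (by omega)]
              · have hsl' : ¬ PySem.List.slice cs (some (m:Int)) (some ((m:Int)+2)) = ['$','{'] := fun hh => hdl (hsl.mp hh)
                have hx : ¬ (cs[m] = '$' ∧ PySem.List.pyGet? cs ((m:Int)+1) = some '{') := by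
                  rw [hnxt]; exact hdl
                rw [if_neg hb, if_neg hx, if_neg hb, if_neg hsl']
                by_cases h3 : d > 0 ∧ cs[m] = '}'
                · rw [if_pos h3, if_pos h3, hcast1, ih G H (m+1) (d-1) (by omega) (by omega) (by omega)]
                · rw [if_neg h3, if_neg h3]
                  by_cases h4 : d = 0 ∧ cs[m] = '`'
                  · rw [if_pos h4, if_pos h4, hcast1]
                    exact bLoop_irrel cs F H .normal (m+1) (by omega) (by omega)
                  · rw [if_neg h4, if_neg h4, hcast1, ih G H (m+1) d (by omega) (by omega) (by omega)]
          · have hnlt : ¬ ((m:Int) < (cs.length : Int)) := by exact_mod_cast h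
            have hs : aSkipBtGo cs (G+1) d (m:Int) = cs.length := by
              rw [aSkipBtGo, if_neg hnlt]
            rw [bLoop_ge cs _ _ _ (by omega), hs, bLoop_ge cs _ _ _ (by omega)]

theorem pvFindCharGo_step (cs : List Char) (ch : Char) (F : Nat) (j : Nat)
    (hF : 1 ≤ F) (hj : j < cs.length) (hc : ¬ cs[j] = ch) :
    pvFindCharGo cs ch F j = pvFindCharGo cs ch (F-1) (j+1) := by
  cases F with
  | zero => omega
  | succ F => rw [pvFindCharGo, if_pos hj, getD_at cs j hj, if_neg hc]; rfl

theorem aMain_eq_bLoop (cs : List Char) : ∀ (F F' : Nat) (m : Nat),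
    cs.length - m < F → cs.length - m < F' →
    aMain cs F (m:Int) = bLoop cs F' .normal (m:Int) := by
  intro F
  induction F with
  | zero => intro F' m hF hF'; omega
  | succ F ih =>
      intro F' m hF hF'
      cases F' with
      | zero => omega
      | succ F' =>
          by_cases h : m < cs.length
          · have hlt : (m:Int) < (cs.length : Int) := by exact_mod_cast h
            rw [aMain, if_pos hlt]
            rw [bLoop, if_pos hlt]
            simp only [pyGet?_at cs m h]
            have hcast2 : (m:Int) + 2 = ((m+2 : Nat) : Int) := by push_cast; ring
            have hcast1 : (m:Int) + 1 = ((m+1 : Nat) : Int) := by push_cast; ring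
            have hnxt : PySem.List.pyGet? cs ((m:Int) + 1) = cs[m+1]? := by
              rw [hcast1]; exact PySem.List.pyGet?_natCast cs (m+1)
            by_cases h1 : PySem.List.slice cs (some (m:Int)) (some ((m:Int)+2)) = ['/','/']
            · -- line comment
              have hp := (slice_pair cs m h '/' '/').mp h1
              have hm1 : m + 1 < cs.length := (List.getElem?_eq_some_iff.mp hp.2).1
              have hv1 : cs[m+1] = '/' := by
                have := hp.2; rw [List.getElem?_eq_getElem hm1] at this; simpa using this
              rw [if_pos h1]
              have hcond : cs[m] = '/' ∧ PySem.List.pyGet? cs ((m:Int)+1) = some '/' := ⟨hp.1, by rw [hnxt]; exact hp.2⟩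
              rw [if_pos hcond]
              -- A's find starts at m, but cs[m] and cs[m+1] are '/', so it equals the find from m+2
              have hfc : pvFindChar cs '\n' (m:Int) = pvFindCharGo cs '\n' (cs.length + 1) (m+2) := by
                unfold pvFindChar
                simp only [if_neg (by omega : ¬ (m:Int) < 0), Int.toNat_natCast]
                rw [pvFindCharGo_step cs '\n' (cs.length+1) m (by omega) h (by rw [hp.1]; decide)]
                rw [pvFindCharGo_step cs '\n' (cs.length+1-1) (m+1) (by omega) hm1 (by rw [hv1]; decide)]
                exact pvFindCharGo_irrel cs '\n' (cs.length+1-1-1) (cs.length+1) (m+2) (by omega) (by omega)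
              rw [hfc, hcast2,
                bLoop_line_eq cs F' (cs.length+1) (cs.length+1) (m+2) (by omega) (by omega) (by omega)]
              by_cases hnl : pvFindCharGo cs '\n' (cs.length+1) (m+2) = -1
              · rw [if_pos hnl, if_pos hnl]
              · rw [if_neg hnl, if_neg hnl]
                rcases pvFindCharGo_ge cs '\n' (cs.length+1) (m+2) with hx | hx
                · exact absurd hx hnl
                · set nl := pvFindCharGo cs '\n' (cs.length+1) (m+2) with hnldef
                  have hc2 : nl + 1 = ((nl.toNat + 1 : Nat) : Int) := by omega
                  rw [hc2, ih (cs.length+1) (nl.toNat + 1) (by omega) (by omega)]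
            · rw [if_neg h1]
              have hcond1 : ¬ (cs[m] = '/' ∧ PySem.List.pyGet? cs ((m:Int)+1) = some '/') := by
                rw [hnxt]; exact fun hh => h1 ((slice_pair cs m h '/' '/').mpr hh)
              rw [if_neg hcond1]
              by_cases h2 : PySem.List.slice cs (some (m:Int)) (some ((m:Int)+2)) = ['/','*']
              · -- block comment
                have hp := (slice_pair cs m h '/' '*').mp h2
                rw [if_pos h2]
                have hcond : cs[m] = '/' ∧ PySem.List.pyGet? cs ((m:Int)+1) = some '*' := ⟨hp.1, by rw [hnxt]; exact hp.2⟩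
                rw [if_pos hcond]
                have hfs : pvFindSub2 cs '*' '/' ((m:Int)+2) = pvFindSub2Go cs '*' '/' (cs.length+1) (m+2) := by
                  unfold pvFindSub2
                  rw [hcast2]
                  simp only [if_neg (by omega : ¬ (((m+2:Nat)):Int) < 0), Int.toNat_natCast]
                rw [hfs, hcast2,
                  bLoop_block_eq cs F' (cs.length+1) (cs.length+1) (m+2) (by omega) (by omega) (by omega)]
                by_cases he : pvFindSub2Go cs '*' '/' (cs.length+1) (m+2) = -1
                · rw [if_pos he, if_pos he]
                · rw [if_neg he, if_neg he]
                  rcases pvFindSub2Go_ge cs '*' '/' (cs.length+1) (m+2) with hx | hx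
                  · exact absurd hx he
                  · set e := pvFindSub2Go cs '*' '/' (cs.length+1) (m+2) with hedef
                    have hc2 : e + 2 = ((e.toNat + 2 : Nat) : Int) := by omega
                    rw [hc2, ih (cs.length+1) (e.toNat + 2) (by omega) (by omega)]
              · rw [if_neg h2]
                have hcond2 : ¬ (cs[m] = '/' ∧ PySem.List.pyGet? cs ((m:Int)+1) = some '*') := by
                  rw [hnxt]; exact fun hh => h2 ((slice_pair cs m h '/' '*').mpr hh)
                rw [if_neg hcond2]
                by_cases h3 : cs[m] = '"' ∨ cs[m] = '\''
                · -- string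
                  rw [if_pos h3, if_pos h3]
                  have hss : aSkipString cs (m:Int) = aSkipStrGo cs cs[m] (cs.length+1) ((m:Int)+1) := by
                    unfold aSkipString
                    rw [if_neg (by exact_mod_cast not_le.mpr h)]
                    simp only [pyGet?_at cs m h]
                    rw [if_pos h3]
                  have hlb : (m:Int) + 1 ≤ aSkipStrGo cs cs[m] (cs.length+1) ((m:Int)+1) := by
                    rcases aSkipStrGo_ge cs cs[m] (cs.length+1) ((m:Int)+1) with hx | hx
                    · exact hx
                    · rw [hx]; exact_mod_cast by omega
                  have hpos : aSkipString cs (m:Int) > 0 := by rw [hss]; omega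
                  rw [if_pos hpos, hss]
                  set s := aSkipStrGo cs cs[m] (cs.length+1) ((m:Int)+1) with hsdef
                  rw [hcast1,
                    bLoop_str_eq cs F' (cs.length+1) (cs.length+1) (m+1) cs[m] (by omega) (by omega) (by omega),
                    ← hcast1, ← hsdef]
                  have hcs : s = ((s.toNat : Nat) : Int) := by omega
                  rw [hcs, ih (cs.length+1) s.toNat (by omega) (by omega)]
                · rw [if_neg h3, if_neg h3]
                  by_cases h4 : cs[m] = '`'
                  · -- template literal
                    rw [if_pos h4, if_pos h4]
                    unfold aSkipBacktick
                    have hlb : (m:Int) + 1 ≤ aSkipBtGo cs (cs.length+1) 0 ((m:Int)+1) := by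
                      rcases aSkipBtGo_ge cs (cs.length+1) 0 ((m:Int)+1) with hx | hx
                      · omega
                      · rw [hx]; exact_mod_cast by omega
                    set s := aSkipBtGo cs (cs.length+1) 0 ((m:Int)+1) with hsdef
                    rw [hcast1,
                      bLoop_tmpl_eq cs F' (cs.length+1) (cs.length+1) (m+1) 0 (by omega) (by omega) (by omega),
                      ← hcast1, ← hsdef]
                    have hcs : s = ((s.toNat : Nat) : Int) := by omega
                    rw [hcs, ih (cs.length+1) s.toNat (by omega) (by omega)]
                  · rw [if_neg h4, if_neg h4]
                    by_cases h5 : cs[m] = ';'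
                    · rw [if_pos h5, if_pos h5]
                    · rw [if_neg h5, if_neg h5, hcast1, ih F' (m+1) (by omega) (by omega)]
          · rw [bLoop_ge cs _ _ _ (by exact_mod_cast Nat.le_of_not_lt h),
              aMain_ge cs _ _ (by exact_mod_cast Nat.le_of_not_lt h)]

-- ===== VERDICT (by name: the statement is the Claim_ definition above) =====
theorem find_statement_end_spec : Claim_equal_find_statement_end := by
  intro text start _ hpre
  unfold Spec_find_statement_end find_statement_end find_statement_end_alt
  have harg : (if start > 0 then start else 0) = start := by
    unfold Pre_find_statement_end at hpre; split <;> omega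
  rw [harg]
  have hcs : start = ((start.toNat : Nat) : Int) := by
    unfold Pre_find_statement_end at hpre; omega
  have hmain := aMain_eq_bLoop text.toList (text.toList.length + start.natAbs + 1)
    (text.toList.length + 1) start.toNat (by omega) (by omega)
  rw [← hcs] at hmain
  exact hmain
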